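-- pv_equiv track=rewrite | github.com/piyushPathak309/gfg-list-problems-with-python-code | gfg_list_problems.py | func
-- ===== SOURCE A (Python) =====
-- def func(x):
--     count=0
--     main_lis=[]
--     for i in range(len(x)-1):
--         if x[i]==x[i+1]:
--             count=count+1
--         if count==2:
--             main_lis.append(x[i])
--             count=0
--     return main_lis
-- ===== SOURCE B (Python) =====
-- def func(x):
--     matches = [x[i] for i in range(len(x) - 1) if x[i] == x[i + 1]]
--     return [v for j, v in enumerate(matches) if j % 2 == 1]
-- ===== Notes on version B (the rewrite author's own statement) =====
-- stated objective: simpler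
-- what changed: Replaces A's single fused loop with a mod-2 counter and in-loop reset by two independent passes: first collect the values at all consecutive-equal positions, then keep every odd-indexed one.
import Mathlib
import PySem

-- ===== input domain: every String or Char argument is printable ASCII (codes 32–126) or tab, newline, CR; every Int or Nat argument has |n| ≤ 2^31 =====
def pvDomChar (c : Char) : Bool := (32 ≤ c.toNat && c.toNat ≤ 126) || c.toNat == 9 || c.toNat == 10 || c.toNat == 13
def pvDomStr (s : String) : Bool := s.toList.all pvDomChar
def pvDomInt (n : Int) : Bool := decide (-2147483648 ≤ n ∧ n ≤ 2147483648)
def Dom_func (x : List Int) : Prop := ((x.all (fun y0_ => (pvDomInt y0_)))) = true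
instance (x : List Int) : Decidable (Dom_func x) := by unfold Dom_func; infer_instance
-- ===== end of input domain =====

-- B replaces A's fused counter-with-reset loop by two passes (collect consecutive-equal matches,
-- then keep every odd-indexed one); objective: simpler, same cost.


-- ===== PORT A =====
-- loop body of A: update count, and on count == 2 append x[i] and reset
def stepA (x : List Int) (st : Int × List Int) (i : Int) : Int × List Int :=
  let count := if PySem.List.pyGetD x i 0 = PySem.List.pyGetD x (i + 1) 0
               then st.1 + 1 else st.1
  if count = 2 then (0, st.2 ++ [PySem.List.pyGetD x i 0]) else (count, st.2)

def func (x : List Int) : List Int :=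
  ((PySem.List.pyRange 0 ((x.length : Int) - 1) 1).foldl (stepA x) (0, [])).2

-- ===== PORT B =====
def func_alt (x : List Int) : List Int :=
  let ms :=
    (PySem.List.pyRange 0 ((x.length : Int) - 1) 1).foldl
      (fun acc i =>
        if PySem.List.pyGetD x i 0 = PySem.List.pyGetD x (i + 1) 0
        then acc ++ [PySem.List.pyGetD x i 0] else acc) []
  (PySem.List.enumerate ms 0).foldl
    (fun acc jv => if PySem.Int.mod jv.1 2 = 1 then acc ++ [jv.2] else acc) []

-- ===== PRECONDITION & SPEC =====
def Spec_func (x : List Int) (out : List Int) : Prop := out = func_alt x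
instance (x : List Int) (out : List Int) : Decidable (Spec_func x out) := by unfold Spec_func; infer_instance

-- ===== CLAIM (what is proved, stated in full; the proofs are below) =====
def Claim_equal_func : Prop := ∀ (x : List Int), Dom_func x → Spec_func x (func x)

-- ===== LEMMAS AND PROOFS =====

-- every second element, `b = true` means the next element is taken
def pick (b : Bool) : List Int → List Int
  | [] => []
  | a :: t => if b then a :: pick false t else pick true t

-- the list of match-values collected by a single structural pass over the index list
def mList (x : List Int) : List Int → List Int
  | [] => []
  | i :: L => if PySem.List.pyGetD x i 0 = PySem.List.pyGetD x (i + 1) 0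
              then PySem.List.pyGetD x i 0 :: mList x L else mList x L

lemma matches_fold (x : List Int) (L : List Int) (acc : List Int) :
    L.foldl (fun acc i =>
        if PySem.List.pyGetD x i 0 = PySem.List.pyGetD x (i + 1) 0
        then acc ++ [PySem.List.pyGetD x i 0] else acc) acc
      = acc ++ mList x L := by
  induction L generalizing acc with
  | nil => simp [mList]
  | cons i L ih =>
    simp only [List.foldl_cons, mList]
    split_ifs with h <;> simp [ih]

lemma pick_fold (M : List Int) (s : Int) (acc : List Int) :
    (PySem.List.enumerate M s).foldl
        (fun acc jv => if PySem.Int.mod jv.1 2 = 1 then acc ++ [jv.2] else acc) acc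
      = acc ++ pick (PySem.Int.mod s 2 = 1) M := by
  induction M generalizing s acc with
  | nil => simp [PySem.List.enumerate_nil, pick]
  | cons a M ih =>
    rw [PySem.List.enumerate_cons, List.foldl_cons, ih]
    have h2 : PySem.Int.mod s 2 = s % 2 := PySem.Int.mod_eq_emod_of_pos (by omega)
    have h2' : PySem.Int.mod (s + 1) 2 = (s + 1) % 2 := PySem.Int.mod_eq_emod_of_pos (by omega)
    by_cases h : s % 2 = 1
    · have : (s + 1) % 2 = 0 := by omega
      simp [pick, h, this]
    · have h0 : s % 2 = 0 := by omega
      have : (s + 1) % 2 = 1 := by omega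
      simp [pick, h0, this]

lemma A_fold (x : List Int) (L : List Int) (c : Int) (acc : List Int)
    (hc : c = 0 ∨ c = 1) :
    (L.foldl (stepA x) (c, acc)).2 = acc ++ pick (c = 1) (mList x L) := by
  induction L generalizing c acc with
  | nil => simp [mList, pick]
  | cons i L ih =>
    rw [List.foldl_cons]
    by_cases h : PySem.List.pyGetD x i 0 = PySem.List.pyGetD x (i + 1) 0
    · rcases hc with hc | hc
      · subst hc
        have hstep : stepA x (0, acc) i = (1, acc) := by
          simp only [stepA, if_pos h]; norm_num
        rw [hstep, ih 1 acc (Or.inr rfl)]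
        simp [mList, h, pick]
      · subst hc
        have hstep : stepA x (1, acc) i = (0, acc ++ [PySem.List.pyGetD x i 0]) := by
          simp only [stepA, if_pos h]; norm_num
        rw [hstep, ih 0 (acc ++ [PySem.List.pyGetD x i 0]) (Or.inl rfl)]
        simp [mList, h, pick]
    · have hstep : stepA x (c, acc) i = (c, acc) := by
        have hne : ¬ (c = 2) := by rcases hc with hc | hc <;> omega
        simp only [stepA, if_neg h, if_neg hne]
      rw [hstep, ih c acc hc]
      simp [mList, h]

-- ===== VERDICT (by name: the statement is the Claim_ definition above) =====
theorem func_spec : Claim_equal_func := by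
  intro x _
  unfold Spec_func func func_alt
  rw [A_fold x _ 0 [] (Or.inl rfl), matches_fold, pick_fold]
  simp [PySem.Int.mod]
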